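-- pv_equiv track=rewrite | github.com/AP-MI-2021/lab-3-RaulParaschivBucur | main.py | get_longest_product_is_odd
-- ===== SOURCE A (Python) =====
-- def has_only_odd_nr(lst):
--     """
--     Verifica daca o lista are doar numere impare
--     """
--     for elem in lst:
--         if elem % 2 == 0:
--             return False
--     return True
--
-- def get_longest_product_is_odd(lst: list[int]) -> list[int]:
--     """
--     Input: O lista
--     Output: Cea mai lunga secventa in care produsul tuturor numerelor este impar
--             (Aceasta lista poate contine doar nr impare pt. ca doar produsul de nr
--              impare este un nr impar)
--     """
--     result_lst = []
--     maxim = 0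
--     for pos1 in range(0, len(lst)):
--         for pos2 in range(pos1, len(lst)):
--             if has_only_odd_nr(lst[pos1: pos2 + 1]):
--                 if len(lst[pos1: pos2 + 1]) >= maxim:
--                     maxim = len(lst[pos1: pos2 + 1])
--                     result_lst = lst[pos1: pos2 + 1]
--     return result_lst
-- ===== SOURCE B (Python) =====
-- def get_longest_product_is_odd(lst: list[int]) -> list[int]:
--     # One pass: collect the maximal runs of odd numbers as (start, length),
--     # then take the last run with maximal length (ties go to the later run,
--     # matching the >= update) and slice it out.
--     runs = []
--     cur = 0
--     for i, x in enumerate(lst):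
--         if x % 2 != 0:
--             cur += 1
--         else:
--             if cur > 0:
--                 runs.append((i - cur, cur))
--             cur = 0
--     if cur > 0:
--         runs.append((len(lst) - cur, cur))
--     best_start, best_len = 0, 0
--     for s, L in runs:
--         if L >= best_len:
--             best_start, best_len = s, L
--     return lst[best_start:best_start + best_len]
-- ===== Notes on version B (the rewrite author's own statement) =====
-- stated objective: faster
-- what changed: Replaced the O(n^3) triple pass (all start/end pairs, each slice re-scanned for evenness) by a single left-to-right pass that collects the maximal odd runs as (start,length) pairs and then picks the last run of maximal length (matching A's >= tie-breaking).
import Mathlib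
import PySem

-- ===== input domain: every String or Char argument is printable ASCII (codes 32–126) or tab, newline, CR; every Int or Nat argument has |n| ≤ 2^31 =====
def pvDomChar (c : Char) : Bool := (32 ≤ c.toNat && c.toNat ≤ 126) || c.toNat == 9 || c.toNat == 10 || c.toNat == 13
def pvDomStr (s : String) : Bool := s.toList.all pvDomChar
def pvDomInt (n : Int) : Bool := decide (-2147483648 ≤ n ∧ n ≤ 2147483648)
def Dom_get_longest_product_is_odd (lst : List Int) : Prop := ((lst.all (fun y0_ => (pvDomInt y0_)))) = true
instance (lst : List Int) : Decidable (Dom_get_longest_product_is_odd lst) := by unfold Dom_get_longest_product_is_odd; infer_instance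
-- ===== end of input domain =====

-- B replaces A's cubic all-pairs slice scan by one linear pass collecting the maximal odd runs
-- and choosing the last longest one (objective: faster, asymptotic).

-- ===== PORT A =====
def has_only_odd_nr (l : List Int) : Bool :=
  l.all (fun e => !(PySem.Int.mod e 2 == 0))

def get_longest_product_is_odd (lst : List Int) : List Int :=
  ((PySem.List.pyRange 0 (lst.length : Int) 1).foldl (fun (st : List Int × Int) pos1 =>
    (PySem.List.pyRange pos1 (lst.length : Int) 1).foldl (fun (st : List Int × Int) pos2 =>
      if has_only_odd_nr (PySem.List.slice lst (some pos1) (some (pos2 + 1))) then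
        (if ((PySem.List.slice lst (some pos1) (some (pos2 + 1))).length : Int) ≥ st.2 then
          (PySem.List.slice lst (some pos1) (some (pos2 + 1)),
           ((PySem.List.slice lst (some pos1) (some (pos2 + 1))).length : Int))
        else st)
      else st) st) ([], 0)).1

-- ===== PORT B =====
def get_longest_product_is_odd_alt (lst : List Int) : List Int :=
  let p := (PySem.List.enumerate lst 0).foldl
    (fun (st : List (Int × Int) × Int) (ix : Int × Int) =>
      if PySem.Int.mod ix.2 2 ≠ 0 then (st.1, st.2 + 1)
      else ((if st.2 > 0 then st.1 ++ [(ix.1 - st.2, st.2)] else st.1), 0))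
    ([], 0)
  let runs := if p.2 > 0 then p.1 ++ [((lst.length : Int) - p.2, p.2)] else p.1
  let best := runs.foldl (fun (b : Int × Int) (r : Int × Int) => if r.2 ≥ b.2 then r else b) (0, 0)
  PySem.List.slice lst (some best.1) (some (best.1 + best.2))

-- ===== PRECONDITION & SPEC =====
def Spec_get_longest_product_is_odd (lst : List Int) (out : List Int) : Prop := out = get_longest_product_is_odd_alt lst
instance (lst : List Int) (out : List Int) : Decidable (Spec_get_longest_product_is_odd lst out) := by unfold Spec_get_longest_product_is_odd; infer_instance

-- ===== CLAIM (what is proved, stated in full; the proofs are below) =====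
def Claim_equal_get_longest_product_is_odd : Prop := ∀ (lst : List Int), Dom_get_longest_product_is_odd lst → Spec_get_longest_product_is_odd lst (get_longest_product_is_odd lst)

-- ===== LEMMAS AND PROOFS =====

-- length of the odd run at the head of a list
def rlen : List Int → Nat
  | [] => 0
  | x :: xs => if PySem.Int.mod x 2 == 0 then 0 else rlen xs + 1

-- A's inner-loop body, applied to the slice lst[pos1 : pos2+1]
def stepA (st : List Int × Int) (s : List Int) : List Int × Int :=
  if has_only_odd_nr s then
    (if (s.length : Int) ≥ st.2 then (s, (s.length : Int)) else st)
  else st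

-- the net effect of A's whole inner loop that starts at position p
def stepO (lst : List Int) (st : List Int × Int) (p : Nat) : List Int × Int :=
  if 1 ≤ rlen (lst.drop p) ∧ st.2 ≤ (rlen (lst.drop p) : Int)
  then ((lst.drop p).take (rlen (lst.drop p)), (rlen (lst.drop p) : Int))
  else st

-- B's run-selection step, B's run-building loop body, and that loop as structural recursion
def stepRun (b : Int × Int) (r : Int × Int) : Int × Int := if r.2 ≥ b.2 then r else b

def stepB (st : List (Int × Int) × Int) (ix : Int × Int) : List (Int × Int) × Int :=
  if PySem.Int.mod ix.2 2 ≠ 0 then (st.1, st.2 + 1)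
  else ((if st.2 > 0 then st.1 ++ [(ix.1 - st.2, st.2)] else st.1), 0)

def runsAux : List Int → Int → Int → List (Int × Int)
  | [], i, cur => if cur > 0 then [(i - cur, cur)] else []
  | x :: xs, i, cur =>
    if PySem.Int.mod x 2 == 0 then
      (if cur > 0 then [(i - cur, cur)] else []) ++ runsAux xs (i + 1) 0
    else runsAux xs (i + 1) (cur + 1)

-- reading B's (start, length) state as A's (slice, maxim) state
def conv (lst : List Int) (b : Int × Int) : List Int × Int :=
  ((lst.drop b.1.toNat).take b.2.toNat, b.2)

lemma rlen_cons_even {x : Int} (xs : List Int) (h : PySem.Int.mod x 2 = 0) :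
    rlen (x :: xs) = 0 := by
  simp only [rlen, beq_iff_eq, h, if_true]

lemma rlen_cons_odd {x : Int} (xs : List Int) (h : ¬ PySem.Int.mod x 2 = 0) :
    rlen (x :: xs) = rlen xs + 1 := by
  simp only [rlen, beq_iff_eq, if_neg h]

lemma foldl_fixed {α β : Type} (l : List α) (f : β → α → β) (b : β)
    (h : ∀ a ∈ l, f b a = b) : l.foldl f b = b := by
  induction l with
  | nil => rfl
  | cons a l ih =>
    have hb := h a (by simp)
    simp only [List.foldl_cons, hb]
    exact ih (fun a' ha' => h a' (by simp [ha']))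

lemma rlen_le (d : List Int) : rlen d ≤ d.length := by
  induction d with
  | nil => simp [rlen]
  | cons x xs ih =>
    by_cases h : PySem.Int.mod x 2 = 0
    · rw [rlen_cons_even xs h]; omega
    · rw [rlen_cons_odd xs h]; simp; omega

lemma rlen_drop (d : List Int) (k : Nat) (h : k ≤ rlen d) :
    rlen (d.drop k) = rlen d - k := by
  induction d generalizing k with
  | nil => simp [rlen] at h ⊢
  | cons x xs ih =>
    cases k with
    | zero => simp
    | succ k =>
      by_cases hx : PySem.Int.mod x 2 = 0
      · rw [rlen_cons_even xs hx] at h; omega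
      · rw [rlen_cons_odd xs hx] at h ⊢
        simp only [List.drop_succ_cons]
        rw [ih k (by omega)]
        omega

lemma runsAux_cons_even {x : Int} (xs : List Int) (i cur : Int)
    (h : PySem.Int.mod x 2 = 0) :
    runsAux (x :: xs) i cur
    = (if cur > 0 then [(i - cur, cur)] else []) ++ runsAux xs (i + 1) 0 := by
  simp only [runsAux, beq_iff_eq, h, if_true]

lemma runsAux_cons_odd {x : Int} (xs : List Int) (i cur : Int)
    (h : ¬ PySem.Int.mod x 2 = 0) :
    runsAux (x :: xs) i cur = runsAux xs (i + 1) (cur + 1) := by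
  simp only [runsAux, beq_iff_eq, if_neg h]

lemma runsAux_midrun (d : List Int) : ∀ (i cur : Int), 1 ≤ cur →
    runsAux d i cur = (i - cur, cur + rlen d) :: runsAux (d.drop (rlen d)) (i + rlen d) 0 := by
  induction d with
  | nil =>
    intro i cur hc
    simp only [runsAux, rlen, List.drop_nil]
    rw [if_pos (by omega), if_neg (by omega)]
    simp
  | cons x xs ih =>
    intro i cur hc
    by_cases hx : PySem.Int.mod x 2 = 0
    · rw [rlen_cons_even xs hx]
      simp only [Nat.cast_zero, add_zero, List.drop_zero]
      rw [runsAux_cons_even xs i cur hx, runsAux_cons_even xs i 0 hx]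
      rw [if_pos (by omega : (0:Int) < cur), if_neg (by omega : ¬ ((0:Int) < 0))]
      simp
    · rw [rlen_cons_odd xs hx]
      rw [runsAux_cons_odd xs i cur hx]
      rw [ih (i + 1) (cur + 1) (by omega)]
      simp only [List.drop_succ_cons]
      congr 1
      · congr 1 <;> push_cast <;> ring
      · congr 1; push_cast; ring

lemma runsAux_run (d : List Int) (i : Int) (h : 1 ≤ rlen d) :
    runsAux d i 0 = (i, (rlen d : Int)) :: runsAux (d.drop (rlen d)) (i + rlen d) 0 := by
  cases d with
  | nil => simp [rlen] at h
  | cons x xs =>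
    by_cases hx : PySem.Int.mod x 2 = 0
    · rw [rlen_cons_even xs hx] at h; omega
    · rw [rlen_cons_odd xs hx]
      rw [runsAux_cons_odd xs i 0 hx]
      rw [runsAux_midrun xs (i + 1) (0 + 1) (by omega)]
      simp only [List.drop_succ_cons]
      congr 1
      · congr 1 <;> push_cast <;> ring
      · congr 1; push_cast; ring

lemma runsAux_entries (d : List Int) : ∀ (i cur : Int), 0 ≤ cur → cur ≤ i →
    ∀ p ∈ runsAux d i cur, 0 ≤ p.1 ∧ 0 ≤ p.2 := by
  induction d with
  | nil =>
    intro i cur h0 hi p hp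
    simp only [runsAux] at hp
    by_cases hc : cur > 0
    · rw [if_pos hc] at hp; simp at hp; subst hp; constructor <;> simp <;> omega
    · rw [if_neg hc] at hp; simp at hp
  | cons x xs ih =>
    intro i cur h0 hi p hp
    by_cases hx : PySem.Int.mod x 2 = 0
    · rw [runsAux_cons_even xs i cur hx] at hp
      rw [List.mem_append] at hp
      rcases hp with hp | hp
      · by_cases hc : cur > 0
        · rw [if_pos hc] at hp; simp at hp; subst hp; constructor <;> simp <;> omega
        · rw [if_neg hc] at hp; simp at hp
      · exact ih (i + 1) 0 (by omega) (by omega) p hp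
    · rw [runsAux_cons_odd xs i cur hx] at hp
      exact ih (i + 1) (cur + 1) (by omega) (by omega) p hp

lemma foldRun_nonneg (runs : List (Int × Int)) : ∀ (b : Int × Int),
    (∀ p ∈ runs, 0 ≤ p.1 ∧ 0 ≤ p.2) → 0 ≤ b.1 → 0 ≤ b.2 →
    0 ≤ (runs.foldl stepRun b).1 ∧ 0 ≤ (runs.foldl stepRun b).2 := by
  induction runs with
  | nil => intro b _ h1 h2; exact ⟨h1, h2⟩
  | cons r rs ih =>
    intro b h h1 h2
    simp only [List.foldl_cons]
    have hr := h r (by simp)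
    have : 0 ≤ (stepRun b r).1 ∧ 0 ≤ (stepRun b r).2 := by
      unfold stepRun; split <;> simp_all
    exact ih _ (fun p hp => h p (by simp [hp])) this.1 this.2

lemma bFold (d : List Int) : ∀ (i : Int) (R : List (Int × Int)) (cur : Int),
    (let p := (PySem.List.enumerate d i).foldl stepB (R, cur);
     if p.2 > 0 then p.1 ++ [((i + (d.length : Int)) - p.2, p.2)] else p.1)
    = R ++ runsAux d i cur := by
  induction d with
  | nil =>
    intro i R cur
    simp only [PySem.List.enumerate_nil, List.foldl_nil, runsAux, List.length_nil]
    by_cases hc : cur > 0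
    · rw [if_pos hc, if_pos hc]; simp
    · rw [if_neg hc, if_neg hc]; simp
  | cons x xs ih =>
    intro i R cur
    simp only [PySem.List.enumerate_cons, List.foldl_cons]
    by_cases hx : PySem.Int.mod x 2 = 0
    · have hsb : stepB (R, cur) (i, x) =
        ((if cur > 0 then R ++ [(i - cur, cur)] else R), 0) := by
        simp only [stepB]
        rw [if_neg (fun h => h hx)]
      rw [hsb]
      have := ih (i + 1) (if cur > 0 then R ++ [(i - cur, cur)] else R) 0
      simp only at this ⊢
      rw [show (i + ((x :: xs).length : Int)) = ((i + 1) + (xs.length : Int)) by simp; ring,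
          this]
      rw [runsAux_cons_even xs i cur hx]
      by_cases hc : cur > 0
      · rw [if_pos hc, if_pos hc]; simp
      · rw [if_neg hc, if_neg hc]; simp
    · have hsb : stepB (R, cur) (i, x) = (R, cur + 1) := by
        simp only [stepB]
        rw [if_pos hx]
      rw [hsb]
      have := ih (i + 1) R (cur + 1)
      simp only at this ⊢
      rw [show (i + ((x :: xs).length : Int)) = ((i + 1) + (xs.length : Int)) by simp; ring,
          this]
      rw [runsAux_cons_odd xs i cur hx]

lemma hoo_cons_even {x : Int} (l : List Int) (h : PySem.Int.mod x 2 = 0) :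
    has_only_odd_nr (x :: l) = false := by
  simp only [has_only_odd_nr, List.all_cons, h, beq_self_eq_true, Bool.not_true,
    Bool.false_and]

lemma hoo_cons_odd {x : Int} (l : List Int) (h : ¬ PySem.Int.mod x 2 = 0) :
    has_only_odd_nr (x :: l) = has_only_odd_nr l := by
  simp only [has_only_odd_nr, List.all_cons]
  rw [show (PySem.Int.mod x 2 == 0) = false from beq_eq_false_iff_ne.2 h]
  simp

lemma hoo_append (pre l : List Int) (hp : ∀ e ∈ pre, ¬ PySem.Int.mod e 2 = 0) :
    has_only_odd_nr (pre ++ l) = has_only_odd_nr l := by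
  induction pre with
  | nil => simp
  | cons p ps ih =>
    rw [List.cons_append, hoo_cons_odd _ (hp p (by simp))]
    exact ih (fun e he => hp e (by simp [he]))

lemma gspec (d : List Int) : ∀ (pre : List Int) (st : List Int × Int),
    (∀ e ∈ pre, ¬ (PySem.Int.mod e 2 = 0)) →
    (List.range d.length).foldl (fun st (j : Nat) => stepA st (pre ++ d.take (j + 1))) st
    = if 1 ≤ rlen d ∧ st.2 ≤ ((pre.length + rlen d : Nat) : Int)
      then (pre ++ d.take (rlen d), ((pre.length + rlen d : Nat) : Int)) else st := by
  induction d with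
  | nil =>
    intro pre st hp
    rw [if_neg (by simp [rlen])]
    rfl
  | cons x xs ih =>
    intro pre st hp
    simp only [List.length_cons, List.range_succ_eq_map, List.foldl_cons, List.foldl_map]
    have htake1 : (x :: xs).take (0 + 1) = [x] := rfl
    rw [htake1]
    by_cases hx : PySem.Int.mod x 2 = 0
    · -- even head: the whole inner loop is a no-op
      have hst0 : stepA st (pre ++ [x]) = st := by
        unfold stepA
        rw [hoo_append pre [x] hp, hoo_cons_even _ hx]
        simp
      rw [hst0]
      rw [foldl_fixed]
      · rw [if_neg (by rw [rlen_cons_even xs hx]; simp)]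
      · intro j _
        unfold stepA
        rw [List.take_succ_cons, hoo_append pre _ hp, hoo_cons_even _ hx]
        simp
    · -- odd head
      have hhoo : has_only_odd_nr (pre ++ [x]) = true := by
        rw [hoo_append pre [x] hp, hoo_cons_odd _ hx]
        rfl
      have hfun : (fun (st : List Int × Int) (j : Nat) =>
            stepA st (pre ++ (x :: xs).take (j.succ + 1)))
          = fun st j => stepA st ((pre ++ [x]) ++ xs.take (j + 1)) := by
        funext st j
        rw [show j.succ + 1 = (j + 1) + 1 from rfl, List.take_succ_cons]
        rw [show pre ++ x :: xs.take (j + 1) = (pre ++ [x]) ++ xs.take (j + 1) by simp]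
      rw [hfun]
      have hp' : ∀ e ∈ pre ++ [x], ¬ PySem.Int.mod e 2 = 0 := by
        intro e he
        rcases List.mem_append.1 he with h | h
        · exact hp e h
        · simp at h; subst h; exact hx
      rw [ih (pre ++ [x]) (stepA st (pre ++ [x])) hp']
      have hlen : ((pre ++ [x]).length : Int) = (pre.length : Int) + 1 := by simp
      have hst1 : stepA st (pre ++ [x])
          = if (pre.length : Int) + 1 ≥ st.2 then (pre ++ [x], (pre.length : Int) + 1)
            else st := by
        unfold stepA
        rw [hhoo, hlen]
        simp
      rw [rlen_cons_odd xs hx]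
      rcases Nat.eq_zero_or_pos (rlen xs) with hr | hr
      · rw [hr]
        rw [if_neg (by omega)]
        rw [hst1]
        by_cases hle : st.2 ≤ (pre.length : Int) + 1
        · rw [if_pos (by omega), if_pos ⟨by omega, by push_cast; omega⟩]
          simp only [Prod.mk.injEq]
          constructor
          · simp
          · push_cast; ring
        · rw [if_neg (by omega), if_neg (by rintro ⟨_, h2⟩; push_cast at h2; omega)]
      · by_cases hle : st.2 ≤ (pre.length : Int) + 1
        · have hst1' : stepA st (pre ++ [x]) = (pre ++ [x], (pre.length : Int) + 1) := by
            rw [hst1, if_pos (by omega)]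
          rw [hst1']
          rw [if_pos ⟨by omega, by simp <;> omega⟩]
          rw [if_pos ⟨by omega, by push_cast; omega⟩]
          simp only [Prod.mk.injEq, List.take_succ_cons]
          constructor
          · simp
          · push_cast; simp; ring
        · have hst1' : stepA st (pre ++ [x]) = st := by
            rw [hst1, if_neg (by omega)]
          rw [hst1']
          by_cases hle2 : st.2 ≤ (pre.length : Int) + 1 + (rlen xs : Int)
          · rw [if_pos ⟨by omega, by simp <;> (push_cast; omega)⟩]
            rw [if_pos ⟨by omega, by push_cast; omega⟩]
            simp only [Prod.mk.injEq, List.take_succ_cons]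
            constructor
            · simp
            · push_cast; simp; ring
          · rw [if_neg (by rintro ⟨_, h2⟩; simp at h2; push_cast at h2; omega)]
            rw [if_neg (by rintro ⟨_, h2⟩; push_cast at h2; omega)]

lemma innerEq (lst : List Int) (i : Nat) (hi : i ≤ lst.length) (st : List Int × Int) :
    (PySem.List.pyRange (i : Int) (lst.length : Int) 1).foldl
      (fun st pos2 => stepA st (PySem.List.slice lst (some (i : Int)) (some (pos2 + 1)))) st
    = stepO lst st i := by
  rw [PySem.List.pyRange_one]
  rw [show (((lst.length : Int)) - (i : Int)).toNat = lst.length - i by omega]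
  rw [List.foldl_map]
  have hfun : (fun (st : List Int × Int) (k : Nat) =>
      stepA st (PySem.List.slice lst (some (i : Int)) (some ((i : Int) + (k : Int) + 1))))
      = fun st k => stepA st ([] ++ (lst.drop i).take (k + 1)) := by
    funext st k
    rw [show (i : Int) + (k : Int) + 1 = ((i + k + 1 : Nat) : Int) by push_cast; ring]
    rw [PySem.List.slice_natCast]
    rw [show i + k + 1 - i = k + 1 by omega]
    simp
  rw [hfun]
  rw [show lst.length - i = (lst.drop i).length by simp]
  rw [gspec (lst.drop i) [] st (by simp)]
  unfold stepO
  simp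

lemma outerEq (lst : List Int) : ∀ (m i : Nat) (b : Int × Int), i ≤ lst.length →
    lst.length - i = m →
    (List.range (lst.length - i)).foldl (fun st k => stepO lst st (i + k)) (conv lst b)
    = conv lst ((runsAux (lst.drop i) (i : Int) 0).foldl stepRun b) := by
  intro m
  induction m using Nat.strong_induction_on with
  | _ m IH =>
  intro i b hi hm
  rcases hd : lst.drop i with _ | ⟨x, xs⟩
  · have h0 : lst.length - i = 0 := by
      have := congrArg List.length hd; simp at this; omega
    rw [h0]
    simp only [List.range_zero, List.foldl_nil, runsAux]
    rw [if_neg (by omega)]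
    rfl
  · have hlt : i < lst.length := by
      have := congrArg List.length hd; simp at this; omega
    have hxs : lst.drop (i + 1) = xs := by
      rw [← List.drop_drop, hd]; rfl
    by_cases hx : PySem.Int.mod x 2 = 0
    · -- even head: one no-op step, then recurse at i+1
      have hr0 : rlen (lst.drop i) = 0 := by rw [hd]; exact rlen_cons_even xs hx
      rw [show lst.length - i = (lst.length - (i + 1)) + 1 by omega,
          List.range_succ_eq_map, List.foldl_cons, List.foldl_map]
      rw [show stepO lst (conv lst b) (i + 0) = conv lst b by
        unfold stepO; rw [if_neg (by rw [Nat.add_zero, hr0]; rintro ⟨h1, _⟩; omega)]]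
      rw [show (fun (st : List Int × Int) (k : Nat) => stepO lst st (i + k.succ))
            = fun st k => stepO lst st ((i + 1) + k) by
        funext st k; rw [show i + k.succ = (i + 1) + k by omega]]
      rw [show (List.range (lst.length - (i + 1))).foldl
            (fun st k => stepO lst st ((i + 1) + k)) (conv lst b)
          = conv lst ((runsAux (lst.drop (i + 1)) ((i + 1 : Nat) : Int) 0).foldl stepRun b)
        from IH (lst.length - (i + 1)) (by omega) (i + 1) b (by omega) rfl]
      rw [hxs, runsAux_cons_even xs (i : Int) 0 hx]
      rw [if_neg (by omega)]
      rw [List.nil_append]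
      push_cast
      rfl
    · -- odd head: process the whole run atomically, then recurse at i+r
      have hr1 : 1 ≤ rlen (lst.drop i) := by rw [hd, rlen_cons_odd xs hx]; omega
      have hrle : rlen (lst.drop i) ≤ lst.length - i := by
        have := rlen_le (lst.drop i); simpa using this
      set r := rlen (lst.drop i) with hrdef
      set st1 := conv lst (stepRun b ((i : Int), (r : Int))) with hst1def
      -- first step of the run
      have hfirst : stepO lst (conv lst b) (i + 0) = st1 := by
        rw [Nat.add_zero, hst1def]
        unfold stepO stepRun conv
        rw [← hrdef]
        by_cases hb : b.2 ≤ (r : Int)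
        · rw [if_pos ⟨hr1, hb⟩, if_pos (by simpa using hb)]
          simp
        · rw [if_neg (by rintro ⟨_, h2⟩; omega), if_neg (by simpa using hb)]
      -- the r-1 positions inside the run are no-ops
      have hst12 : (r : Int) ≤ st1.2 := by
        rw [hst1def]
        unfold stepRun conv
        by_cases hb : b.2 ≤ (r : Int)
        · rw [if_pos (by simpa using hb)]
        · rw [if_neg (by simpa using hb)]; simp; omega
      have hmid : ∀ (k : Nat), k ∈ List.range (r - 1) → stepO lst st1 (i + k.succ) = st1 := by
        intro k hk
        rw [List.mem_range] at hk
        unfold stepO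
        rw [if_neg]
        rintro ⟨h1, h2⟩
        rw [show i + k.succ = i + (k + 1) by omega, ← List.drop_drop,
            rlen_drop (lst.drop i) (k + 1) (by omega), ← hrdef] at h1 h2
        omega
      -- split the index range into the run and the rest
      rw [show lst.length - i = r + (lst.length - (i + r)) by omega,
          List.range_add, List.foldl_append,
          show r = (r - 1) + 1 by omega,
          List.range_succ_eq_map, List.foldl_cons, List.foldl_map, hfirst]
      rw [List.foldl_map]
      rw [foldl_fixed (List.range (r - 1))
            (fun (st : List Int × Int) (k : Nat) => stepO lst st (i + k.succ)) st1 hmid]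
      rw [show (fun (st : List Int × Int) (k : Nat) => stepO lst st (i + ((r - 1) + 1 + k)))
            = fun st k => stepO lst st ((i + r) + k) by
        funext st k; rw [show i + ((r - 1) + 1 + k) = (i + r) + k by omega]]
      rw [show r - 1 + 1 = r from by omega]
      rw [show (List.range (lst.length - (i + r))).foldl
            (fun st k => stepO lst st ((i + r) + k)) st1
          = conv lst ((runsAux (lst.drop (i + r)) ((i + r : Nat) : Int) 0).foldl stepRun
              (stepRun b ((i : Int), (r : Int))))
        from IH (lst.length - (i + r)) (by omega) (i + r) _ (by omega) rfl]
      rw [← hd, runsAux_run (lst.drop i) (i : Int) hr1, ← hrdef, List.foldl_cons,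
          List.drop_drop]
      push_cast
      rfl

lemma main_eq (lst : List Int) :
    get_longest_product_is_odd lst = get_longest_product_is_odd_alt lst := by
  have hnonneg : 0 ≤ ((runsAux lst 0 0).foldl stepRun (0, 0)).1
      ∧ 0 ≤ ((runsAux lst 0 0).foldl stepRun (0, 0)).2 :=
    foldRun_nonneg (runsAux lst 0 0) (0, 0)
      (runsAux_entries lst 0 0 (le_refl 0) (le_refl 0)) (by simp) (by simp)
  -- A computes conv of the best run
  have hA : get_longest_product_is_odd lst
      = (conv lst ((runsAux lst 0 0).foldl stepRun (0, 0))).1 := by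
    have h0 : get_longest_product_is_odd lst
        = ((PySem.List.pyRange 0 (lst.length : Int) 1).foldl
            (fun (st : List Int × Int) pos1 =>
              (PySem.List.pyRange pos1 (lst.length : Int) 1).foldl
                (fun st pos2 =>
                  stepA st (PySem.List.slice lst (some pos1) (some (pos2 + 1)))) st)
            ([], 0)).1 := rfl
    rw [h0, PySem.List.pyRange_zero_nat, List.foldl_map]
    rw [PySem.List.foldl_congr_mem (List.range lst.length) _
          (fun st (k : Nat) => stepO lst st k) ([], 0)
          (fun st k hk => innerEq lst k (Nat.le_of_lt (List.mem_range.1 hk)) st)]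
    rw [show (fun (st : List Int × Int) (k : Nat) => stepO lst st k)
          = fun st k => stepO lst st (0 + k) by
      funext st k; rw [Nat.zero_add]]
    rw [show List.range lst.length = List.range (lst.length - 0) by rw [Nat.sub_zero]]
    rw [show ([] , (0 : Int)) = conv lst (0, 0) by unfold conv; simp]
    rw [outerEq lst (lst.length - 0) 0 (0, 0) (by omega) rfl]
    rw [List.drop_zero]
    norm_num
  -- B computes the slice of the best run
  have hB : get_longest_product_is_odd_alt lst
      = PySem.List.slice lst (some ((runsAux lst 0 0).foldl stepRun (0, 0)).1)
          (some (((runsAux lst 0 0).foldl stepRun (0, 0)).1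
                 + ((runsAux lst 0 0).foldl stepRun (0, 0)).2)) := by
    have hb := bFold lst 0 [] 0
    simp only [List.nil_append, zero_add] at hb
    show (let p := (PySem.List.enumerate lst 0).foldl stepB ([], 0);
          let runs := if p.2 > 0 then p.1 ++ [((lst.length : Int) - p.2, p.2)] else p.1;
          let best := runs.foldl stepRun (0, 0);
          PySem.List.slice lst (some best.1) (some (best.1 + best.2))) = _
    simp only
    rw [hb]
  rw [hA, hB,
      PySem.List.slice_toNat lst hnonneg.1 (by omega)]
  unfold conv
  rw [show (((runsAux lst 0 0).foldl stepRun (0, 0)).1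
        + ((runsAux lst 0 0).foldl stepRun (0, 0)).2).toNat
        - ((runsAux lst 0 0).foldl stepRun (0, 0)).1.toNat
      = ((runsAux lst 0 0).foldl stepRun (0, 0)).2.toNat by omega]

-- ===== VERDICT (by name: the statement is the Claim_ definition above) =====
theorem get_longest_product_is_odd_spec : Claim_equal_get_longest_product_is_odd := by
  intro lst _
  unfold Spec_get_longest_product_is_odd
  exact main_eq lst
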